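-- pv_equiv track=rewrite | github.com/microsoft/Model_Based_Testing_Using_LLMs | tester/bgp/rr_rmap/gobgp/utils.py | subs_prefix
-- ===== SOURCE A (Python) =====
-- def inv(i):
--     if i == "1":
--         return "0"
--     else:
--         return "1"
--
-- def subs(a,b):
--     r = []
--     if len(a) < len(b):
--         if b.startswith(a):
--             x = b[len(a):]
--             for i in range(len(x)):
--                 _x = x
--                 _x = _x[:i] + inv(_x[i]) + _x[i+1:]
--                 r.append(a + _x[:i+1])
--         else:
--             r.append(a)
--     else:
--         if not a.startswith(b):
--             r.append(a)
--     return r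
--
-- def subs_prefix(p,s):
--     r = []
--     for q in p:
--         a = q[0]
--         b = s[0]
--         ge1 = q[1]
--         le1 = q[2]
--         ge2 = s[1]
--         le2 = s[2]
--
--         if ge2 <= ge1 and le2 >= le1:
--             if subs(a,b) != []:
--                 r += [(i, ge1, le1) for i in subs(a,b)]
--         elif ge2 > ge1 and le2 < le1:
--             r += [(a, ge1, ge2-1), (a, le2+1, le1)]
--             r += [(i, ge2, le2) for i in subs(a,b)]
--         elif ge2 <= ge1 and le2 < le1 and le2 >= ge1:
--             r += [(a, le2+1, le1)]
--             r += [(i, ge1, le2) for i in subs(a,b)]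
--         elif ge2 > ge1 and le2 >= le1 and ge2 <= le1:
--             r += [(a, ge1, ge2-1)]
--             r += [(i, ge2, le1) for i in subs(a,b)]
--         else:
--             r += [(a, ge1, le1)]
--     return r
-- ===== SOURCE B (Python) =====
-- def inv(i):
--     if i == "1":
--         return "0"
--     else:
--         return "1"
--
-- def subs(a, b):
--     # Recursive trie-path descent: while a is a proper prefix of b, emit the
--     # sibling of b's next character under a and descend; no index loop, no splicing.
--     if b.startswith(a) and len(a) < len(b):
--         c = b[len(a)]
--         return [a + inv(c)] + subs(a + c, b)
--     if a.startswith(b):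
--         return []
--     return [a]
--
-- def pieces(q, s):
--     # The pieces one prefix q contributes after subtracting s.
--     a, ge1, le1 = q
--     b, ge2, le2 = s
--     if (ge2 <= ge1 and le2 < le1 and le2 < ge1) or (ge2 > ge1 and le2 >= le1 and ge2 > le1):
--         return [(a, ge1, le1)]
--     out = []
--     if ge2 > ge1:
--         out.append((a, ge1, ge2 - 1))
--     if le2 < le1:
--         out.append((a, le2 + 1, le1))
--     lo, hi = max(ge1, ge2), min(le1, le2)
--     return out + [(x, lo, hi) for x in subs(a, b)]
--
-- def subs_prefix(p, s):
--     return [piece for q in p for piece in pieces(q, s)]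
-- ===== Notes on version B (the rewrite author's own statement) =====
-- stated objective: alternative
-- what changed: subs is rewritten as a recursive trie-path descent (emit the sibling of b's next character and recurse on the extended prefix, replacing A's index loop that splices a flipped bit into a suffix copy), and subs_prefix becomes a flat comprehension over a per-prefix 'pieces' helper computing one unified interval intersection instead of A's accumulator loop with five ordered overlap branches.
import Mathlib
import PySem

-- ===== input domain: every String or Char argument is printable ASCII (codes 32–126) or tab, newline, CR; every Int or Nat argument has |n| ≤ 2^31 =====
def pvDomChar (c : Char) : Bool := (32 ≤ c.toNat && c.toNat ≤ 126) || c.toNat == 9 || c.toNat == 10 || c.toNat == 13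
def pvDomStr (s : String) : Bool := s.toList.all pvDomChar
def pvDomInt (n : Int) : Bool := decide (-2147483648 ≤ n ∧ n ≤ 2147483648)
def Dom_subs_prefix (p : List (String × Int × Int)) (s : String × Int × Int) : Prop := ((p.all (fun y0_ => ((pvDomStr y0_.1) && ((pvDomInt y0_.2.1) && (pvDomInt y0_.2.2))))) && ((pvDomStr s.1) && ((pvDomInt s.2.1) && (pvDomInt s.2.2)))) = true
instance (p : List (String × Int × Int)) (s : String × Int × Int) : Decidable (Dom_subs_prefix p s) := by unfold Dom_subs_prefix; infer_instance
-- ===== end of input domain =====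

-- B rewrites subs as a recursive trie-path descent (no index loop, no bit-splice into a
-- suffix copy) and subs_prefix as a flat comprehension over a per-prefix helper with one
-- unified interval intersection instead of five ordered overlap branches (objective: alternative).

-- ===== PORT A =====
def invA (i : List Char) : List Char := if i = ['1'] then ['0'] else ['1']

def subsA (a b : List Char) : List (List Char) :=
  if a.length < b.length then
    if PySem.Chars.startswith b a then
      let x := PySem.List.slice b (some (a.length : Int)) none
      (PySem.List.pyRange 0 (x.length : Int) 1).foldl
        (fun r i =>
          let ux := PySem.List.slice x none (some i) ++ invA [PySem.List.pyGetD x i ' ']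
                      ++ PySem.List.slice x (some (i + 1)) none
          r ++ [a ++ PySem.List.slice ux none (some (i + 1))]) []
    else [a]
  else
    if !PySem.Chars.startswith a b then [a] else []

def subs_prefix (p : List (String × Int × Int)) (s : String × Int × Int) : List (String × Int × Int) :=
  p.foldl (fun r q =>
    let a := q.1
    let b := s.1
    let ge1 := q.2.1
    let le1 := q.2.2
    let ge2 := s.2.1
    let le2 := s.2.2
    if ge2 ≤ ge1 ∧ le2 ≥ le1 then
      if subsA a.toList b.toList ≠ [] then
        r ++ (subsA a.toList b.toList).map (fun i => (String.ofList i, ge1, le1))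
      else r
    else if ge2 > ge1 ∧ le2 < le1 then
      (r ++ [(a, ge1, ge2 - 1), (a, le2 + 1, le1)])
        ++ (subsA a.toList b.toList).map (fun i => (String.ofList i, ge2, le2))
    else if ge2 ≤ ge1 ∧ le2 < le1 ∧ le2 ≥ ge1 then
      (r ++ [(a, le2 + 1, le1)])
        ++ (subsA a.toList b.toList).map (fun i => (String.ofList i, ge1, le2))
    else if ge2 > ge1 ∧ le2 ≥ le1 ∧ ge2 ≤ le1 then
      (r ++ [(a, ge1, ge2 - 1)])
        ++ (subsA a.toList b.toList).map (fun i => (String.ofList i, ge2, le1))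
    else r ++ [(a, ge1, le1)]) []

-- ===== PORT B =====
def invB (i : List Char) : List Char := if i = ['1'] then ['0'] else ['1']

-- b[len(a)] is read only when 0 ≤ len(a) < len(b), so plain getD is exact there.
def subsB (a b : List Char) : List (List Char) :=
  if h : PySem.Chars.startswith b a = true ∧ a.length < b.length then
    let c := b.getD a.length ' '
    (a ++ invB [c]) :: subsB (a ++ [c]) b
  else if PySem.Chars.startswith a b then [] else [a]
termination_by b.length - a.length
decreasing_by have := h.2; simp; omega

def piecesB (q : String × Int × Int) (s : String × Int × Int) : List (String × Int × Int) :=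
  let a := q.1
  let ge1 := q.2.1
  let le1 := q.2.2
  let b := s.1
  let ge2 := s.2.1
  let le2 := s.2.2
  if (ge2 ≤ ge1 ∧ le2 < le1 ∧ le2 < ge1) ∨ (ge2 > ge1 ∧ le2 ≥ le1 ∧ ge2 > le1) then
    [(a, ge1, le1)]
  else
    let out := if ge2 > ge1 then [(a, ge1, ge2 - 1)] else []
    let out := if le2 < le1 then out ++ [(a, le2 + 1, le1)] else out
    out ++ (subsB a.toList b.toList).map (fun x => (String.ofList x, max ge1 ge2, min le1 le2))

def subs_prefix_alt (p : List (String × Int × Int)) (s : String × Int × Int) : List (String × Int × Int) :=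
  p.flatMap (fun q => piecesB q s)

-- ===== PRECONDITION & SPEC =====
def Spec_subs_prefix (p : List (String × Int × Int)) (s : String × Int × Int) (out : List (String × Int × Int)) : Prop := out = subs_prefix_alt p s
instance (p : List (String × Int × Int)) (s : String × Int × Int) (out : List (String × Int × Int)) : Decidable (Spec_subs_prefix p s out) := by unfold Spec_subs_prefix; infer_instance

-- ===== CLAIM (what is proved, stated in full; the proofs are below) =====
def Claim_equal_subs_prefix : Prop := ∀ (p : List (String × Int × Int)) (s : String × Int × Int), Dom_subs_prefix p s → Spec_subs_prefix p s (subs_prefix p s)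

-- ===== LEMMAS AND PROOFS =====
-- Closed form both subs variants equal when a is a proper prefix of b = a ++ t.
def pvF (a t : List Char) : List (List Char) :=
  (List.range t.length).map (fun k => a ++ t.take k ++ invA [t.getD k ' '])

theorem length_invA (i : List Char) : (invA i).length = 1 := by
  unfold invA; split <;> rfl

theorem pvF_cons (a : List Char) (c : Char) (t : List Char) :
    pvF a (c :: t) = (a ++ invA [c]) :: pvF (a ++ [c]) t := by
  unfold pvF
  rw [List.length_cons, List.range_succ_eq_map, List.map_cons, List.map_map]
  simp [List.append_assoc]

theorem subsA_char (t a : List Char) (ht : t ≠ []) : subsA a (a ++ t) = pvF a t := by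
  have hpre : PySem.Chars.startswith (a ++ t) a = true :=
    (PySem.Chars.startswith_iff _ _).2 ⟨t, rfl⟩
  have hlen : a.length < (a ++ t).length := by
    simp [List.length_append]; exact List.length_pos_iff.2 ht
  unfold subsA
  simp only [hlen, hpre, if_pos]
  rw [PySem.List.slice_from_natCast, List.drop_left]
  rw [PySem.List.foldl_append_singleton_eq_map, List.nil_append]
  apply List.ext_getElem
  · simp [PySem.List.length_pyRange_one, pvF]
  · intro k h1 h2
    have hk : k < t.length := by
      simp [PySem.List.length_pyRange_one] at h1; omega
    simp only [pvF, List.getElem_map, PySem.List.getElem_pyRange_one, zero_add,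
      List.getElem_range]
    have e1 : ((k : Int) + 1) = ((k + 1 : Nat) : Int) := by push_cast; ring
    rw [e1]
    simp only [PySem.List.slice_to_natCast, PySem.List.slice_from_natCast,
      PySem.List.pyGetD_natCast]
    have htk : (t.take k).length = k := by simp; omega
    have h3 : (t.take k).take (k + 1) = t.take k := by
      rw [List.take_take]; congr 1; omega
    have h4 : k + 1 - k = 1 := by omega
    have h5 : (invA [t.getD k ' ']).take 1 = invA [t.getD k ' '] := by
      apply List.take_of_length_le; rw [length_invA]
    have h6 : k + 1 - (List.take k t ++ invA [t.getD k ' ']).length = 0 := by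
      rw [List.length_append, htk, length_invA]; omega
    rw [List.take_append, h6, List.take_zero, List.append_nil]
    rw [List.take_append, htk, h3, h4, h5, List.append_assoc]

theorem subsB_char (t : List Char) : ∀ a, subsB a (a ++ t) = pvF a t := by
  induction t with
  | nil =>
    intro a
    unfold subsB
    have : ¬ (PySem.Chars.startswith (a ++ []) a = true ∧ a.length < (a ++ []).length) := by
      simp
    rw [dif_neg this]
    have hs : PySem.Chars.startswith a a = true :=
      (PySem.Chars.startswith_iff a a).2 ⟨[], by simp⟩
    simp [hs, pvF]
  | cons c t ih =>
    intro a
    have hpre : PySem.Chars.startswith (a ++ c :: t) a = true :=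
      (PySem.Chars.startswith_iff _ _).2 ⟨c :: t, rfl⟩
    have hlen : a.length < (a ++ c :: t).length := by simp
    unfold subsB
    rw [dif_pos ⟨hpre, hlen⟩]
    have hget : (a ++ c :: t).getD a.length ' ' = c := by
      rw [List.getD_append_right a (c :: t) ' ' a.length le_rfl]
      simp
    show (a ++ invB [(a ++ c :: t).getD a.length ' ']) ::
        subsB (a ++ [(a ++ c :: t).getD a.length ' ']) (a ++ c :: t) = _
    rw [hget, pvF_cons]
    have h2 : subsB (a ++ [c]) (a ++ c :: t) = pvF (a ++ [c]) t := by
      rw [show a ++ c :: t = (a ++ [c]) ++ t by simp]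
      exact ih (a ++ [c])
    rw [h2]
    rfl

theorem startswith_false_of_lt {a b : List Char} (h : a.length < b.length) :
    PySem.Chars.startswith a b = false := by
  by_contra hc
  have := (PySem.Chars.startswith_iff a b).1 (by simpa using hc)
  have := this.length_le
  omega

theorem subsA_eq_subsB (a b : List Char) : subsA a b = subsB a b := by
  by_cases hlen : a.length < b.length
  · by_cases hpre : PySem.Chars.startswith b a = true
    · obtain ⟨t, hbt⟩ := (PySem.Chars.startswith_iff b a).1 hpre
      subst hbt
      have ht : t ≠ [] := by
        rintro rfl; simp at hlen
      rw [subsA_char t a ht, subsB_char t a]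
    · unfold subsA subsB
      rw [if_pos hlen, if_neg hpre, dif_neg (by tauto)]
      rw [startswith_false_of_lt hlen]
      simp
  · unfold subsA subsB
    rw [if_neg hlen, dif_neg (by tauto)]
    by_cases hab : PySem.Chars.startswith a b = true <;> simp [hab]

-- ===== VERDICT (by name: the statement is the Claim_ definition above) =====
theorem subs_prefix_spec : Claim_equal_subs_prefix := by
  unfold Claim_equal_subs_prefix
  intro p s _
  unfold Spec_subs_prefix subs_prefix subs_prefix_alt
  rw [show (p.foldl (fun r q =>
      let a := q.1
      let b := s.1
      let ge1 := q.2.1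
      let le1 := q.2.2
      let ge2 := s.2.1
      let le2 := s.2.2
      if ge2 ≤ ge1 ∧ le2 ≥ le1 then
        if subsA a.toList b.toList ≠ [] then
          r ++ (subsA a.toList b.toList).map (fun i => (String.ofList i, ge1, le1))
        else r
      else if ge2 > ge1 ∧ le2 < le1 then
        (r ++ [(a, ge1, ge2 - 1), (a, le2 + 1, le1)])
          ++ (subsA a.toList b.toList).map (fun i => (String.ofList i, ge2, le2))
      else if ge2 ≤ ge1 ∧ le2 < le1 ∧ le2 ≥ ge1 then
        (r ++ [(a, le2 + 1, le1)])
          ++ (subsA a.toList b.toList).map (fun i => (String.ofList i, ge1, le2))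
      else if ge2 > ge1 ∧ le2 ≥ le1 ∧ ge2 ≤ le1 then
        (r ++ [(a, ge1, ge2 - 1)])
          ++ (subsA a.toList b.toList).map (fun i => (String.ofList i, ge2, le1))
      else r ++ [(a, ge1, le1)]) [])
    = p.foldl (fun r q => r ++ piecesB q s) [] from ?_,
    PySem.List.foldl_append_eq_flatMap, List.nil_append]
  apply PySem.List.foldl_congr_mem
  intro r q hq
  simp only [subsA_eq_subsB, piecesB]
  by_cases hnil : subsB q.1.toList s.1.toList = []
  · simp only [hnil, ne_eq, not_true_eq_false, if_false, List.map_nil, List.append_nil]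
    split_ifs <;>
      first
        | (exfalso; omega)
        | (simp; done)
  · simp only [ne_eq, hnil, not_false_eq_true, if_true]
    split_ifs <;>
      first
        | (exfalso; omega)
        | (simp only [List.append_assoc, List.cons_append, List.nil_append]; done)
        | (simp only [max_eq_left (by omega : s.2.1 ≤ q.2.1), min_eq_left (by omega : q.2.2 ≤ s.2.2), List.append_assoc, List.cons_append, List.nil_append]; done)
        | (simp only [max_eq_left (by omega : s.2.1 ≤ q.2.1), min_eq_right (by omega : s.2.2 ≤ q.2.2), List.append_assoc, List.cons_append, List.nil_append]; done)
        | (simp only [max_eq_right (by omega : q.2.1 ≤ s.2.1), min_eq_left (by omega : q.2.2 ≤ s.2.2), List.append_assoc, List.cons_append, List.nil_append]; done)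
        | (simp only [max_eq_right (by omega : q.2.1 ≤ s.2.1), min_eq_right (by omega : s.2.2 ≤ q.2.2), List.append_assoc, List.cons_append, List.nil_append]; done)
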